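-- pv_equiv track=rewrite | github.com/pypi-data/pypi-code-43 | xonsh/xonsh-0.9.12.tar.gz/xonsh/tools.py | columnize
-- ===== SOURCE A (Python) =====
-- import itertools
--
-- def columnize(elems, width=80, newline="\n"):
--     """Takes an iterable of strings and returns a list of lines with the
--     elements placed in columns. Each line will be at most *width* columns.
--     The newline character will be appended to the end of each line.
--     """
--     sizes = [len(e) + 1 for e in elems]
--     total = sum(sizes)
--     nelem = len(elems)
--     if total - 1 <= width:
--         ncols = len(sizes)
--         nrows = 1
--         columns = [sizes]
--         last_longest_row = total
--         enter_loop = False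
--     else:
--         ncols = 1
--         nrows = len(sizes)
--         columns = [sizes]
--         last_longest_row = max(sizes)
--         enter_loop = True
--     while enter_loop:
--         longest_row = sum(map(max, columns))
--         if longest_row - 1 <= width:
--             # we might be able to fit another column.
--             ncols += 1
--             nrows = nelem // ncols
--             columns = [sizes[i * nrows : (i + 1) * nrows] for i in range(ncols)]
--             last_longest_row = longest_row
--         else:
--             # we can't fit another column
--             ncols -= 1
--             nrows = nelem // ncols
--             break
--     pad = (width - last_longest_row + ncols) // ncols
--     pad = pad if pad > 1 else 1
--     data = [elems[i * nrows : (i + 1) * nrows] for i in range(ncols)]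
--     colwidths = [max(map(len, d)) + pad for d in data]
--     colwidths[-1] -= pad
--     row_t = "".join(["{{row[{i}]: <{{w[{i}]}}}}".format(i=i) for i in range(ncols)])
--     row_t += newline
--     lines = [
--         row_t.format(row=row, w=colwidths)
--         for row in itertools.zip_longest(*data, fillvalue="")
--     ]
--     return lines
-- ===== SOURCE B (Python) =====
-- def columnize(elems, width=80, newline="\n"):
--     """Exact re-implementation: sparse table gives O(1) range-max queries, so each
--     candidate column count is evaluated in O(ncols) instead of rebuilding all
--     columns in O(nelem); lines are rendered by direct indexing into elems."""
--     sizes = [len(e) + 1 for e in elems]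
--     nelem = len(elems)
--     total = sum(sizes)
--     if total - 1 <= width:
--         ncols, nrows, llr = nelem, 1, total
--     else:
--         # sparse table: table[j][i] == max(sizes[i : i + 2**j])
--         table = [sizes]
--         k = 1
--         while 2 * k <= nelem:
--             prev = table[-1]
--             table.append([prev[i] if prev[i] >= prev[i + k] else prev[i + k]
--                           for i in range(nelem - 2 * k + 1)])
--             k *= 2
--
--         def range_max(lo, hi):  # max(sizes[lo:hi]) for lo < hi, O(1)
--             j = (hi - lo).bit_length() - 1
--             row = table[j]
--             a, b = row[lo], row[hi - (1 << j)]
--             return a if a >= b else b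
--
--         def longest(c):  # longest row if arranged in c columns
--             r = nelem // c
--             return sum(range_max(i * r, (i + 1) * r) for i in range(c))
--
--         c, llr = 1, 0
--         while True:
--             cur = longest(c)
--             if cur - 1 > width:
--                 break
--             llr = cur
--             c += 1
--         ncols = c - 1
--         nrows = nelem // ncols
--     pad = (width - llr + ncols) // ncols
--     if pad < 1:
--         pad = 1
--     colwidths = []
--     for i in range(ncols):
--         m = 0
--         for r in range(nrows):
--             w = len(elems[i * nrows + r])
--             if w > m:
--                 m = w
--         colwidths.append(m + pad)
--     colwidths[-1] -= pad
--     lines = []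
--     for r in range(nrows):
--         parts = []
--         for i in range(ncols):
--             cell = elems[i * nrows + r]
--             parts.append(cell + " " * (colwidths[i] - len(cell)))
--         lines.append("".join(parts) + newline)
--     return lines
-- ===== Notes on version B (the rewrite author's own statement) =====
-- stated objective: alternative
-- what changed: B precomputes a sparse table over the element sizes and evaluates each candidate column count with O(1) range-max queries instead of rebuilding all column slices and re-scanning them, and renders the lines by direct indexing into elems instead of zip_longest plus a generated format string.
import Mathlib
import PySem

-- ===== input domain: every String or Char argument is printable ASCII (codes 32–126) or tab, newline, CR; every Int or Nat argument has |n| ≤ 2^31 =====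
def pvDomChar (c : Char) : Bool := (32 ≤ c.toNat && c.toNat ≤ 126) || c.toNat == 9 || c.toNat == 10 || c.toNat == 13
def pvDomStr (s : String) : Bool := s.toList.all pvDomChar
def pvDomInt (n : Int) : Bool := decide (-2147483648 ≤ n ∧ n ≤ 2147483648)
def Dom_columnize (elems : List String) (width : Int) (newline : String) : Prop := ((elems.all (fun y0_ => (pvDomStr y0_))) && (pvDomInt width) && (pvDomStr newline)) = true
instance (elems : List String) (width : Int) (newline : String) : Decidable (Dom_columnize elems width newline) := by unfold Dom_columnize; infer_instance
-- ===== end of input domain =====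

-- B replaces A's per-candidate rebuilding of all columns by sparse-table range-max
-- queries and renders lines by direct indexing; exact same return value wherever A returns.

-- ===== PORT A =====

-- Python max() on a nonempty list of ints (max([]) raises ValueError; the [] case below is
-- unreachable on inputs admitted by Pre_columnize).
def pyMaxInt : List Int → Int
  | [] => 0
  | x :: xs => xs.foldl max x

-- A's `while enter_loop:` loop, fueled (state: ncols, columns, last_longest_row; returns the
-- final (ncols, nrows, last_longest_row)).  The fuel `elems.length + 1` always suffices on
-- inputs admitted by Pre_columnize (the loop breaks at ncols ≤ nelem); the fuel-0 branch is
-- unreachable there.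
def columnizeLoopA (sizes : List Int) (nelem width : Int) :
    Nat → Int → List (List Int) → Int → Int × Int × Int
  | 0, ncols, _, llr => (ncols, PySem.Int.floordiv nelem ncols, llr)
  | fuel+1, ncols, columns, llr =>
      let longest := (columns.map pyMaxInt).sum
      if longest - 1 ≤ width then
        let ncols' := ncols + 1
        let nrows' := PySem.Int.floordiv nelem ncols'
        let columns' := (PySem.List.pyRange 0 ncols' 1).map
          (fun i => PySem.List.slice sizes (some (i * nrows')) (some ((i + 1) * nrows')))
        columnizeLoopA sizes nelem width fuel ncols' columns' longest
      else
        (ncols - 1, PySem.Int.floordiv nelem (ncols - 1), llr)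

-- itertools.zip_longest(*cols, fillvalue="") — yields rows while some column is nonempty;
-- fueled with the maximal column length, which is exactly the number of rows produced.
def zipLongestStr : Nat → List (List String) → List (List String)
  | 0, _ => []
  | fuel+1, cols =>
    if cols.any (fun c => !c.isEmpty) then
      cols.map (fun c => c.headD "") :: zipLongestStr fuel (cols.map List.tail)
    else []

-- hand port of one format field "{s: <w}" (left-justify with spaces, never truncates);
-- exact for the 0 ≤ w that occur here.
def padFieldA (s : String) (w : Int) : String :=
  s ++ String.ofList (List.replicate (w - PySem.Str.len s).toNat ' ')

def columnize (elems : List String) (width : Int) (newline : String) : List String :=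
  let sizes : List Int := elems.map (fun e => PySem.Str.len e + 1)
  let total : Int := sizes.sum
  let nelem : Int := (elems.length : Int)
  let st : Int × Int × Int :=
    if total - 1 ≤ width then
      ((sizes.length : Int), 1, total)
    else
      columnizeLoopA sizes nelem width (elems.length + 1) 1 [sizes] (pyMaxInt sizes)
  let ncols := st.1
  let nrows := st.2.1
  let llr := st.2.2
  let pad0 := PySem.Int.floordiv (width - llr + ncols) ncols
  let pad := if pad0 > 1 then pad0 else 1
  let data := (PySem.List.pyRange 0 ncols 1).map
    (fun i => PySem.List.slice elems (some (i * nrows)) (some ((i + 1) * nrows)))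
  let colwidths0 := data.map (fun d => pyMaxInt (d.map PySem.Str.len) + pad)
  -- colwidths[-1] -= pad  (colwidths is nonempty on admitted inputs)
  let colwidths := colwidths0.dropLast ++ [PySem.List.pyGetD colwidths0 (-1) 0 - pad]
  let rows := zipLongestStr ((data.map List.length).foldl max 0) data
  rows.map (fun row =>
    PySem.Str.join "" ((PySem.List.pyRange 0 ncols 1).map
      (fun i => padFieldA (PySem.List.pyGetD row i "") (PySem.List.pyGetD colwidths i 0)))
      ++ newline)

-- ===== PORT B =====

-- sparse-table levels: starting from `prev` (window k), each level doubles the window while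
-- 2*k ≤ nelem.  Fuel `nelem` always suffices (k doubles from 1); list indices are
-- nonnegative and in range on every reachable query, so plain getD is exact here.
def buildLevelsB (nelem : Nat) : Nat → Nat → List Int → List (List Int)
  | 0, _, _ => []
  | fuel+1, k, prev =>
    if 2 * k ≤ nelem then
      let next := (List.range (nelem - 2 * k + 1)).map (fun i =>
        let a := prev.getD i 0
        let b := prev.getD (i + k) 0
        if b ≤ a then a else b)
      next :: buildLevelsB nelem fuel (2 * k) next
    else []

-- range_max(lo, hi) = max(sizes[lo:hi]) for lo < hi; (hi-lo).bit_length()-1 is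
-- PySem.Int.bitLength - 1
def rangeMaxB (table : List (List Int)) (lo hi : Nat) : Int :=
  let j := PySem.Int.bitLength ((hi : Int) - (lo : Int)) - 1
  let row := table.getD j []
  let a := row.getD lo 0
  let b := row.getD (hi - 2 ^ j) 0
  if b ≤ a then a else b

def longestB (table : List (List Int)) (nelem c : Nat) : Int :=
  let r := nelem / c
  ((List.range c).map (fun i => rangeMaxB table (i * r) ((i + 1) * r))).sum

-- Source B's `while True` search, fueled; fuel nelem+1 always suffices on admitted inputs.
def searchB (table : List (List Int)) (nelem : Nat) (width : Int) :
    Nat → Nat → Int → Nat × Int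
  | 0, c, llr => (c, llr)
  | fuel+1, c, llr =>
    let cur := longestB table nelem c
    if cur - 1 > width then (c, llr)
    else searchB table nelem width fuel (c + 1) cur

-- cell + " " * (w - len(cell))  (a negative repeat count gives "")
def padCellB (s : String) (w : Int) : String :=
  s ++ String.ofList (List.replicate (w - PySem.Str.len s).toNat ' ')

def columnize_alt (elems : List String) (width : Int) (newline : String) : List String :=
  let sizes : List Int := elems.map (fun e => PySem.Str.len e + 1)
  let nelem : Nat := elems.length
  let total : Int := sizes.sum
  let st : Nat × Nat × Int :=
    if total - 1 ≤ width then
      (nelem, 1, total)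
    else
      let table := sizes :: buildLevelsB nelem nelem 1 sizes
      let res := searchB table nelem width (nelem + 1) 1 0
      -- ncols = res.1 - 1 is ≥ 1 on admitted inputs (Python raises ZeroDivisionError otherwise)
      (res.1 - 1, nelem / (res.1 - 1), res.2)
  let ncols := st.1
  let nrows := st.2.1
  let llr := st.2.2
  let pad0 := PySem.Int.floordiv (width - llr + (ncols : Int)) (ncols : Int)
  let pad := if pad0 < 1 then 1 else pad0
  let colwidths0 := (List.range ncols).map (fun i =>
    ((List.range nrows).foldl (fun m r =>
        let w := PySem.Str.len (elems.getD (i * nrows + r) "")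
        if m < w then w else m) 0) + pad)
  let colwidths := colwidths0.dropLast ++ [(colwidths0.getLast?.getD 0) - pad]
  (List.range nrows).map (fun r =>
    PySem.Str.join "" ((List.range ncols).map (fun i =>
      padCellB (elems.getD (i * nrows + r) "") (colwidths.getD i 0))) ++ newline)

-- ===== PRECONDITION & SPEC =====

-- Pre_ excludes exactly the inputs on which Python A raises (ZeroDivisionError or ValueError):
-- an empty element list, and inputs where neither everything fits on one line nor every single
-- element fits in the width on its own, so the loop breaks with a zero column count.
-- B raises on exactly the same inputs.
def Pre_columnize (elems : List String) (width : Int) (newline : String) : Prop :=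
  elems ≠ [] ∧
    ((elems.map (fun e => PySem.Str.len e + 1)).sum - 1 ≤ width ∨
      ∀ e ∈ elems, PySem.Str.len e ≤ width)
instance (elems : List String) (width : Int) (newline : String) :
    Decidable (Pre_columnize elems width newline) := by unfold Pre_columnize; infer_instance

def pvWitness_columnize : List String × Int × String := (["aa", "b", "cde"], 7, "\n")

def Spec_columnize (elems : List String) (width : Int) (newline : String) (out : List String) : Prop := out = columnize_alt elems width newline
instance (elems : List String) (width : Int) (newline : String) (out : List String) : Decidable (Spec_columnize elems width newline out) := by unfold Spec_columnize; infer_instance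

-- ===== CLAIM (what is proved, stated in full; the proofs are below) =====
def Claim_equal_columnize : Prop := ∀ (elems : List String) (width : Int) (newline : String), Dom_columnize elems width newline → Pre_columnize elems width newline → Spec_columnize elems width newline (columnize elems width newline)

-- ===== LEMMAS AND PROOFS =====

-- ---------- generic facts about pyMaxInt (Python's max on a nonempty int list) ----------

theorem foldl_max_cons (a y : Int) (t : List Int) :
    List.foldl max a (y :: t) = max a (List.foldl max y t) := by
  simp only [List.foldl_cons]
  exact List.foldl_assoc (op := (max : Int → Int → Int)) (l := t) (a₁ := a) (a₂ := y)

theorem le_pyMaxInt (x : Int) (l : List Int) (hx : x ∈ l) : x ≤ pyMaxInt l := by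
  cases l with
  | nil => simp at hx
  | cons a t =>
    simp only [pyMaxInt]
    rcases List.mem_cons.mp hx with h | h
    · subst h; exact (PySem.List.le_foldl_max t x).1
    · exact (PySem.List.le_foldl_max t a).2 x h

theorem pyMaxInt_mem (l : List Int) (hl : l ≠ []) : pyMaxInt l ∈ l := by
  cases l with
  | nil => exact absurd rfl hl
  | cons a t =>
    simp only [pyMaxInt]
    rcases PySem.List.foldl_max_mem t a with h | h
    · rw [h]; exact List.mem_cons_self
    · exact List.mem_cons_of_mem a h

theorem pyMaxInt_append (xs ys : List Int) (hx : xs ≠ []) (hy : ys ≠ []) :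
    pyMaxInt (xs ++ ys) = max (pyMaxInt xs) (pyMaxInt ys) := by
  obtain ⟨x, xs', rfl⟩ := List.exists_cons_of_ne_nil hx
  obtain ⟨y, ys', rfl⟩ := List.exists_cons_of_ne_nil hy
  simp only [pyMaxInt, List.cons_append, List.foldl_append]
  rw [foldl_max_cons]

-- ---------- the range-max specification: max of a contiguous slice ----------

def sliceMax (l : List Int) (a n : Nat) : Int := pyMaxInt ((l.drop a).take n)

theorem slice_length (l : List Int) (a n : Nat) (h : a + n ≤ l.length) :
    ((l.drop a).take n).length = n := by simp; omega

theorem mem_slice_iff (l : List Int) (a n : Nat) (h : a + n ≤ l.length) (x : Int) :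
    x ∈ (l.drop a).take n ↔ ∃ t, ∃ ht : t < n, x = l[a + t]'(by omega) := by
  rw [List.mem_iff_getElem]
  constructor
  · rintro ⟨i, hi, hx⟩
    rw [slice_length l a n h] at hi
    refine ⟨i, hi, ?_⟩
    rw [← hx]
    simp [List.getElem_take, List.getElem_drop]
  · rintro ⟨t, ht, hx⟩
    refine ⟨t, by rw [slice_length l a n h]; exact ht, ?_⟩
    rw [hx]
    simp [List.getElem_take, List.getElem_drop]

theorem slice_ne_nil (l : List Int) (a n : Nat) (h : a + n ≤ l.length) (hn : 1 ≤ n) :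
    (l.drop a).take n ≠ [] := by
  intro hc
  have := slice_length l a n h
  rw [hc] at this
  simp at this; omega

theorem sliceMax_one (l : List Int) (i : Nat) (h : i < l.length) :
    sliceMax l i 1 = l.getD i 0 := by
  have hs : (l.drop i).take 1 = [l[i]] := by
    apply List.ext_getElem
    · simp; omega
    · intro k h1 h2
      simp at h2
      subst h2
      simp [List.getElem_take, List.getElem_drop]
  rw [sliceMax, hs, List.getD_eq_getElem l 0 h]
  rfl

theorem sliceMax_split (l : List Int) (a k m : Nat) (h : a + k + m ≤ l.length)
    (hk : 1 ≤ k) (hm : 1 ≤ m) :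
    sliceMax l a (k + m) = max (sliceMax l a k) (sliceMax l (a + k) m) := by
  unfold sliceMax
  rw [List.take_add]
  have hdd : (l.drop a).drop k = l.drop (a + k) := by
    rw [List.drop_drop, Nat.add_comm]
  rw [hdd]
  exact pyMaxInt_append _ _ (slice_ne_nil l a k (by omega) hk) (slice_ne_nil l (a+k) m (by omega) hm)

theorem le_sliceMax (l : List Int) (a n t : Nat) (h : a + n ≤ l.length) (ht : t < n) :
    l[a + t]'(by omega) ≤ sliceMax l a n := by
  apply le_pyMaxInt
  rw [mem_slice_iff l a n h]
  exact ⟨t, ht, rfl⟩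

theorem sliceMax_le (l : List Int) (a n : Nat) (h : a + n ≤ l.length) (hn : 1 ≤ n)
    (b : Int) (hb : ∀ t, (ht : t < n) → l[a + t]'(by omega) ≤ b) : sliceMax l a n ≤ b := by
  have hmem := pyMaxInt_mem _ (slice_ne_nil l a n h hn)
  rw [mem_slice_iff l a n h] at hmem
  obtain ⟨t, ht, hx⟩ := hmem
  rw [sliceMax, hx]
  exact hb t ht

-- overlapping windows of size 2^p covering [lo, lo+d) give the slice max
theorem sliceMax_cover (l : List Int) (lo d p : Nat) (hd : 1 ≤ d) (hlen : lo + d ≤ l.length)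
    (hp1 : 2 ^ p ≤ d) (hp2 : d ≤ 2 ^ (p + 1)) :
    sliceMax l lo d = max (sliceMax l lo (2 ^ p)) (sliceMax l (lo + d - 2 ^ p) (2 ^ p)) := by
  have hpow : 1 ≤ 2 ^ p := Nat.one_le_two_pow
  have h2 : (lo + d - 2 ^ p) + 2 ^ p ≤ l.length := by omega
  apply le_antisymm
  · apply sliceMax_le l lo d hlen hd
    intro t ht
    by_cases hcase : t < 2 ^ p
    · exact le_trans (le_of_eq rfl) (le_max_of_le_left (le_sliceMax l lo (2^p) t (by omega) hcase))
    · apply le_max_of_le_right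
      have ht2 : t ≥ d - 2 ^ p := by
        have : 2 ^ (p+1) = 2 ^ p + 2 ^ p := by ring
        omega
      have := le_sliceMax l (lo + d - 2 ^ p) (2 ^ p) (t - (d - 2 ^ p)) h2 (by omega)
      have hidx : (lo + d - 2 ^ p) + (t - (d - 2 ^ p)) = lo + t := by omega
      simpa [hidx] using this
  · apply max_le
    · apply sliceMax_le l lo (2^p) (by omega) hpow
      intro t ht
      exact le_sliceMax l lo d t hlen (by omega)
    · apply sliceMax_le l (lo + d - 2 ^ p) (2^p) h2 hpow
      intro t ht
      have := le_sliceMax l lo d ((lo + d - 2 ^ p + t) - lo) hlen (by omega)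
      have hidx : lo + ((lo + d - 2 ^ p + t) - lo) = lo + d - 2 ^ p + t := by omega
      simpa [hidx] using this

-- ---------- sparse-table correctness ----------

def TblOk (l : List Int) (tbl : List (List Int)) : Prop :=
  ∀ j i, 2 ^ j ≤ l.length → i + 2 ^ j ≤ l.length →
    ((tbl.getD j []).getD i 0) = sliceMax l i (2 ^ j)

theorem getD_map_range_int (f : Nat → Int) (n i : Nat) (h : i < n) :
    ((List.range n).map f).getD i 0 = f i := by
  rw [List.getD_eq_getElem] <;> simp [h]

theorem ite_le_max (a b : Int) : (if b ≤ a then a else b) = max a b := by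
  split_ifs with h <;> omega

theorem buildLevelsB_ok (l : List Int) :
    ∀ (fuel k : Nat) (prev : List Int), 1 ≤ k →
      l.length + 1 ≤ fuel + k →
      (∀ i, i + k ≤ l.length → prev.getD i 0 = sliceMax l i k) →
      ∀ j i, 2 ^ (j + 1) * k ≤ l.length → i + 2 ^ (j + 1) * k ≤ l.length →
        ((buildLevelsB l.length fuel k prev).getD j []).getD i 0 = sliceMax l i (2 ^ (j + 1) * k) := by
  intro fuel
  induction fuel with
  | zero =>
    intro k prev hk hf hp j i hw hi
    have h2k : 2 * k ≤ l.length := by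
      calc 2 * k ≤ 2 ^ (j+1) * k := by
            apply Nat.mul_le_mul_right
            calc 2 = 2^1 := by norm_num
            _ ≤ 2 ^ (j+1) := Nat.pow_le_pow_right (by norm_num) (by omega)
      _ ≤ l.length := hw
    omega
  | succ fuel ih =>
    intro k prev hk hf hp j i hw hi
    have h2k : 2 * k ≤ l.length := by
      calc 2 * k ≤ 2 ^ (j+1) * k := by
            apply Nat.mul_le_mul_right
            calc 2 = 2^1 := by norm_num
            _ ≤ 2 ^ (j+1) := Nat.pow_le_pow_right (by norm_num) (by omega)
      _ ≤ l.length := hw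
    rw [buildLevelsB, if_pos h2k]
    have hnext : ∀ i', i' + 2 * k ≤ l.length →
        ((List.range (l.length - 2 * k + 1)).map (fun i0 =>
          let a := prev.getD i0 0
          let b := prev.getD (i0 + k) 0
          if b ≤ a then a else b)).getD i' 0 = sliceMax l i' (2 * k) := by
      intro i' hi'
      rw [getD_map_range_int _ _ _ (by omega)]
      simp only
      rw [ite_le_max, hp i' (by omega), hp (i' + k) (by omega)]
      have h2 : 2 * k = k + k := by ring
      rw [h2, sliceMax_split l i' k k (by omega) hk hk]
    cases j with
    | zero =>
      simp only [List.getD_cons_zero]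
      have : 2 ^ (0 + 1) * k = 2 * k := by ring
      rw [this]
      exact hnext i (by omega)
    | succ j' =>
      simp only [List.getD_cons_succ]
      have hres := ih (2 * k) _ (by omega) (by omega) hnext j' i
        (by rw [show 2 ^ (j' + 1) * (2 * k) = 2 ^ (j' + 1 + 1) * k by ring]; exact hw)
        (by rw [show 2 ^ (j' + 1) * (2 * k) = 2 ^ (j' + 1 + 1) * k by ring]; exact hi)
      rw [hres]
      congr 1
      ring

theorem table_ok (l : List Int) :
    TblOk l (l :: buildLevelsB l.length l.length 1 l) := by
  intro j i hw hi
  cases j with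
  | zero =>
    simp only [List.getD_cons_zero, pow_zero]
    exact (sliceMax_one l i (by omega)).symm
  | succ j' =>
    simp only [List.getD_cons_succ]
    have := buildLevelsB_ok l l.length 1 l (le_refl 1) (by omega)
      (fun i' hi' => (sliceMax_one l i' (by omega)).symm) j' i
      (by simpa using hw) (by simpa using hi)
    simpa using this

-- ---------- the two longest-row computations agree ----------

theorem bitLength_window (d : Nat) (hd : 1 ≤ d) :
    2 ^ (PySem.Int.bitLength (d : Int) - 1) ≤ d ∧ d < 2 ^ (PySem.Int.bitLength (d : Int) - 1 + 1) := by
  have h1 := PySem.Int.lt_two_pow_bitLength (d : Int)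
  have h2 := PySem.Int.two_pow_bitLength_le (d : Int) (by exact_mod_cast Nat.one_le_iff_ne_zero.mp hd)
  have h3 : (PySem.Int.bitLength (d : Int)) ≠ 0 := by
    intro h0; rw [h0] at h1; simp at h1; omega
  simp at h1 h2
  refine ⟨h2, ?_⟩
  have he : PySem.Int.bitLength (d : Int) - 1 + 1 = PySem.Int.bitLength (d : Int) := by omega
  rw [he]; exact h1

theorem rangeMaxB_ok (l : List Int) (tbl : List (List Int)) (ht : TblOk l tbl)
    (lo hi : Nat) (h1 : lo < hi) (h2 : hi ≤ l.length) :
    rangeMaxB tbl lo hi = sliceMax l lo (hi - lo) := by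
  have hcast : (hi : Int) - (lo : Int) = ((hi - lo : Nat) : Int) := by omega
  have hw := bitLength_window (hi - lo) (by omega)
  set j := PySem.Int.bitLength ((hi - lo : Nat) : Int) - 1 with hj
  have hpow : 1 ≤ 2 ^ j := Nat.one_le_two_pow
  rw [rangeMaxB]
  simp only [hcast, ← hj]
  rw [ht j lo (by omega) (by omega), ht j (hi - 2 ^ j) (by omega) (by omega), ite_le_max]
  have hsub : hi - 2 ^ j = lo + (hi - lo) - 2 ^ j := by omega
  rw [hsub]
  exact (sliceMax_cover l lo (hi - lo) j (by omega) (by omega) hw.1 (le_of_lt hw.2)).symm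

-- the columns A rebuilds for a given column count
def colsForA (sizes : List Int) (nelem c : Int) : List (List Int) :=
  (PySem.List.pyRange 0 c 1).map
    (fun i => PySem.List.slice sizes (some (i * PySem.Int.floordiv nelem c))
                                     (some ((i + 1) * PySem.Int.floordiv nelem c)))

theorem map_pyRange_zero {α : Type} (c : Nat) (f : Int → α) (g : Nat → α)
    (h : ∀ i, i < c → f (i : Int) = g i) :
    (PySem.List.pyRange 0 (c : Int) 1).map f = (List.range c).map g := by
  rw [PySem.List.pyRange_zero_natCast, List.map_map]
  apply List.map_congr_left
  intro i hi
  exact h i (List.mem_range.mp hi)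

theorem colsForA_eq (l : List Int) (c : Nat) :
    colsForA l (l.length : Int) (c : Int) =
      (List.range c).map (fun i => (l.drop (i * (l.length / c))).take (l.length / c)) := by
  unfold colsForA
  apply map_pyRange_zero
  intro i _
  have hfd : PySem.Int.floordiv ((l.length : Nat) : Int) ((c : Nat) : Int)
      = ((l.length / c : Nat) : Int) := PySem.Int.floordiv_natCast _ _
  rw [hfd]
  have h1 : (i : Int) * ((l.length / c : Nat) : Int) = ((i * (l.length / c) : Nat) : Int) := by push_cast; ring
  have h2 : ((i : Int) + 1) * ((l.length / c : Nat) : Int) = (((i + 1) * (l.length / c) : Nat) : Int) := by push_cast; ring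
  rw [h1, h2, PySem.List.slice_natCast]
  have h3 : (i + 1) * (l.length / c) - i * (l.length / c) = l.length / c := by
    rw [Nat.add_mul]
    omega
  rw [h3]

theorem longest_eq (l : List Int) (tbl : List (List Int)) (ht : TblOk l tbl)
    (c : Nat) (hc1 : 1 ≤ c) (hc2 : c ≤ l.length) :
    ((colsForA l (l.length : Int) (c : Int)).map pyMaxInt).sum = longestB tbl l.length c := by
  have hr : 1 ≤ l.length / c := (Nat.one_le_div_iff (by omega)).mpr hc2
  rw [colsForA_eq, longestB, List.map_map]
  congr 1
  apply List.map_congr_left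
  intro i hi
  rw [List.mem_range] at hi
  simp only [Function.comp]
  have hhi : (i + 1) * (l.length / c) ≤ l.length := by
    calc (i + 1) * (l.length / c) ≤ c * (l.length / c) := Nat.mul_le_mul_right _ (by omega)
    _ ≤ l.length := by rw [Nat.mul_comm]; exact Nat.div_mul_le_self _ _
  rw [rangeMaxB_ok l tbl ht (i * (l.length / c)) ((i + 1) * (l.length / c))
    (by nlinarith [hr]) hhi]
  have hsub : (i + 1) * (l.length / c) - i * (l.length / c) = l.length / c := by
    rw [Nat.add_mul]
    omega
  rw [hsub]
  rfl

theorem map_getD_range_self (l : List Int) :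
    (List.range l.length).map (fun i => l.getD i 0) = l := by
  apply List.ext_getElem
  · simp
  · intro i h1 h2
    simp [List.getElem?_eq_getElem h2]

theorem longest_full (l : List Int) (tbl : List (List Int)) (ht : TblOk l tbl)
    (h1 : 1 ≤ l.length) : longestB tbl l.length l.length = l.sum := by
  rw [longestB]
  have hd : l.length / l.length = 1 := Nat.div_self (by omega)
  rw [hd]
  have : ∀ i ∈ List.range l.length,
      rangeMaxB tbl (i * 1) ((i + 1) * 1) = l.getD i 0 := by
    intro i hi
    rw [List.mem_range] at hi
    rw [rangeMaxB_ok l tbl ht (i * 1) ((i + 1) * 1) (by omega) (by omega)]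
    have h2 : (i + 1) * 1 - i * 1 = 1 := by omega
    have h3 : i * 1 = i := by omega
    rw [h2, h3, sliceMax_one l i hi]
  rw [List.map_congr_left this, map_getD_range_self]

-- ---------- the two searches agree ----------

theorem loop_sync (l : List Int) (width : Int) (tbl : List (List Int)) (ht : TblOk l tbl)
    (hbig : ¬ (l.sum - 1 ≤ width)) :
    ∀ (fuel c : Nat) (llr : Int), 2 ≤ c → c ≤ l.length → l.length + 1 ≤ fuel + c →
      columnizeLoopA l (l.length : Int) width fuel (c : Int) (colsForA l (l.length : Int) (c : Int)) llr
        = (((searchB tbl l.length width fuel c llr).1 : Int) - 1,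
           PySem.Int.floordiv (l.length : Int) (((searchB tbl l.length width fuel c llr).1 : Int) - 1),
           (searchB tbl l.length width fuel c llr).2)
      ∧ 2 ≤ (searchB tbl l.length width fuel c llr).1
      ∧ (searchB tbl l.length width fuel c llr).1 ≤ l.length := by
  intro fuel
  induction fuel with
  | zero => intro c llr hc2 hcn hf; omega
  | succ fuel ih =>
    intro c llr hc2 hcn hf
    rw [columnizeLoopA, searchB]
    simp only
    rw [longest_eq l tbl ht c (by omega) hcn]
    by_cases h : longestB tbl l.length c - 1 ≤ width
    · rw [if_pos h, if_neg (by omega)]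
      have hlt : c < l.length := by
        rcases Nat.lt_or_ge c l.length with h' | h'
        · exact h'
        · exfalso
          have hce : c = l.length := by omega
          rw [hce, longest_full l tbl ht (by omega)] at h
          exact hbig h
      have hcast : (c : Int) + 1 = ((c + 1 : Nat) : Int) := by push_cast; ring
      rw [hcast]
      exact ih (c + 1) (longestB tbl l.length c) (by omega) (by omega) (by omega)
    · rw [if_neg h, if_pos (by omega)]
      exact ⟨rfl, hc2, hcn⟩

theorem colsForA_one (l : List Int) : colsForA l (l.length : Int) (1 : Int) = [l] := by
  have h : ((1 : Nat) : Int) = (1 : Int) := by norm_num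
  rw [← h, colsForA_eq]
  simp

-- ---------- rendering ----------

theorem getD_tail (l : List String) (r : Nat) (d : String) : l.tail.getD r d = l.getD (r + 1) d := by
  cases l <;> simp

theorem getD_zero_headD (l : List String) (d : String) : l.headD d = l.getD 0 d := by
  cases l <;> simp

theorem zipLongest_grid (nrows : Nat) :
    ∀ (cols : List (List String)), cols ≠ [] → (∀ c ∈ cols, c.length = nrows) →
      zipLongestStr nrows cols = (List.range nrows).map (fun r => cols.map (fun c => c.getD r "")) := by
  induction nrows with
  | zero => intro cols _ _; rw [zipLongestStr]; simp
  | succ n ih =>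
    intro cols hne hlen
    rw [zipLongestStr]
    have hany : cols.any (fun c => !c.isEmpty) = true := by
      obtain ⟨c0, cs, rfl⟩ := List.exists_cons_of_ne_nil hne
      simp only [List.any_cons, Bool.or_eq_true]
      left
      have := hlen c0 List.mem_cons_self
      cases c0 with
      | nil => simp at this
      | cons a t => simp
    rw [if_pos hany]
    have htail : zipLongestStr n (cols.map List.tail)
        = (List.range n).map (fun r => (cols.map List.tail).map (fun c => c.getD r "")) := by
      apply ih
      · simp [hne]
      · intro c hc
        rw [List.mem_map] at hc
        obtain ⟨c0, hc0, rfl⟩ := hc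
        have := hlen c0 hc0
        cases c0 with
        | nil => simp at this
        | cons a t => simp at this ⊢; omega
    rw [htail, List.range_succ_eq_map]
    simp only [List.map_cons, List.map_map]
    congr 1
    · apply List.map_congr_left
      intro c _
      exact getD_zero_headD c ""
    · apply List.map_congr_left
      intro r _
      simp only [Function.comp]
      apply List.map_congr_left
      intro c _
      exact getD_tail c r ""


-- pad: A's (if pad0 > 1 then pad0 else 1) equals B's (if pad0 < 1 then 1 else pad0)
theorem pad_eq (p : Int) : (if p > 1 then p else 1) = (if p < 1 then 1 else p) := by
  split_ifs <;> omega

theorem padField_eq : padFieldA = padCellB := rfl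

theorem foldl_max_nat_replicate_self (v : Nat) : ∀ k, (List.replicate k v).foldl max v = v := by
  intro k
  induction k with
  | zero => simp
  | succ k ihk => rw [List.replicate_succ, List.foldl_cons, max_self]; exact ihk

theorem foldl_max_nat_replicate (k v : Nat) (hk : 1 ≤ k) :
    ((List.replicate k v).foldl max 0) = v := by
  cases k with
  | zero => omega
  | succ k =>
    rw [List.replicate_succ, List.foldl_cons, Nat.max_eq_right (Nat.zero_le v)]
    exact foldl_max_nat_replicate_self v k

theorem ite_lt_max_int (m w : Int) : (if m < w then w else m) = max m w := by
  split_ifs with h <;> omega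

-- A's max over the lengths in one column equals B's running-max loop over the same column
theorem maxlen_eq (elems : List String) (a : Nat) :
    ∀ n, 1 ≤ n → a + n ≤ elems.length →
      pyMaxInt (((elems.drop a).take n).map PySem.Str.len) =
        (List.range n).foldl (fun m r =>
          let w := PySem.Str.len (elems.getD (a + r) "")
          if m < w then w else m) 0 := by
  intro n
  induction n with
  | zero => omega
  | succ n ih =>
    intro _ hlen
    by_cases hn : 1 ≤ n
    · have htake : (elems.drop a).take (n + 1) = (elems.drop a).take n ++ [elems[a + n]'(by omega)] := by
        rw [List.take_succ]
        congr 1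
        rw [List.getElem?_drop]
        simp [List.getElem?_eq_getElem (show a + n < elems.length by omega)]
      rw [htake, List.map_append, List.map_singleton,
        pyMaxInt_append _ _ (by
          intro hc
          have := congrArg List.length hc
          simp at this
          omega) (by simp),
        List.range_succ, List.foldl_append, List.foldl_cons, List.foldl_nil,
        ← ih hn (by omega)]
      simp only [ite_lt_max_int]
      rw [List.getD_eq_getElem elems "" (show a + n < elems.length by omega)]
      congr 1
    · have hn0 : n = 0 := by omega
      subst hn0
      have htake : (elems.drop a).take 1 = [elems[a]'(by omega)] := by
        apply List.ext_getElem
        · simp; omega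
        · intro k h1 h2
          simp at h2
          subst h2
          simp [List.getElem_take, List.getElem_drop]
      rw [htake]
      have h0 : (0 : Nat) + 1 = 1 := rfl
      simp only [h0, List.range_one, List.map_singleton, List.foldl_cons, List.foldl_nil,
        ite_lt_max_int, Nat.add_zero]
      rw [List.getD_eq_getElem elems "" (show a < elems.length by omega)]
      show pyMaxInt [PySem.Str.len elems[a]] = max 0 (PySem.Str.len elems[a])
      rw [max_eq_right (by simp [PySem.Str.len_eq])]
      rfl

-- the column slices A builds over elems, as Nat-indexed drop/take
theorem dataA_eq (elems : List String) (ncols nrows : Nat) :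
    (PySem.List.pyRange 0 ((ncols : Nat) : Int) 1).map
        (fun i => PySem.List.slice elems (some (i * ((nrows : Nat) : Int)))
                                         (some ((i + 1) * ((nrows : Nat) : Int))))
      = (List.range ncols).map (fun i => (elems.drop (i * nrows)).take nrows) := by
  apply map_pyRange_zero
  intro i _
  have h1 : (i : Int) * ((nrows : Nat) : Int) = ((i * nrows : Nat) : Int) := by push_cast; ring
  have h2 : ((i : Int) + 1) * ((nrows : Nat) : Int) = (((i + 1) * nrows : Nat) : Int) := by push_cast; ring
  rw [h1, h2, PySem.List.slice_natCast]
  have h3 : (i + 1) * nrows - i * nrows = nrows := by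
    rw [Nat.add_mul]
    omega
  rw [h3]

theorem getD_map_range {α : Type} [Inhabited α] (f : Nat → α) (n i : Nat) (d : α) (h : i < n) :
    ((List.range n).map f).getD i d = f i := by
  rw [List.getD_eq_getElem] <;> simp [h]

theorem slice_str_length (l : List String) (a n : Nat) (h : a + n ≤ l.length) :
    ((l.drop a).take n).length = n := by simp; omega

theorem slice_str_getD (l : List String) (a n r : Nat) (h : a + n ≤ l.length) (hr : r < n) :
    ((l.drop a).take n).getD r "" = l.getD (a + r) "" := by
  rw [List.getD_eq_getElem _ "" (by rw [slice_str_length l a n h]; exact hr),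
      List.getD_eq_getElem _ "" (by omega)]
  simp [List.getElem_take, List.getElem_drop]

-- the whole tail after (ncols, nrows, last_longest_row) is fixed: A renders via
-- zip_longest + the format template, B renders by direct indexing; results agree.
theorem tail_eq (elems : List String) (width : Int) (newline : String)
    (ncols nrows : Nat) (llr : Int)
    (h1 : 1 ≤ ncols) (h2 : 1 ≤ nrows) (h3 : ncols * nrows ≤ elems.length) :
    (let pad0 := PySem.Int.floordiv (width - llr + ((ncols : Nat) : Int)) ((ncols : Nat) : Int)
     let pad := if pad0 > 1 then pad0 else 1
     let data := (PySem.List.pyRange 0 ((ncols : Nat) : Int) 1).map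
       (fun i => PySem.List.slice elems (some (i * ((nrows : Nat) : Int)))
                                        (some ((i + 1) * ((nrows : Nat) : Int))))
     let colwidths0 := data.map (fun d => pyMaxInt (d.map PySem.Str.len) + pad)
     let colwidths := colwidths0.dropLast ++ [PySem.List.pyGetD colwidths0 (-1) 0 - pad]
     let rows := zipLongestStr ((data.map List.length).foldl max 0) data
     rows.map (fun row =>
       PySem.Str.join "" ((PySem.List.pyRange 0 ((ncols : Nat) : Int) 1).map
         (fun i => padFieldA (PySem.List.pyGetD row i "") (PySem.List.pyGetD colwidths i 0)))
         ++ newline))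
    =
    (let pad0 := PySem.Int.floordiv (width - llr + (ncols : Int)) (ncols : Int)
     let pad := if pad0 < 1 then 1 else pad0
     let colwidths0 := (List.range ncols).map (fun i =>
       ((List.range nrows).foldl (fun m r =>
           let w := PySem.Str.len (elems.getD (i * nrows + r) "")
           if m < w then w else m) 0) + pad)
     let colwidths := colwidths0.dropLast ++ [(colwidths0.getLast?.getD 0) - pad]
     (List.range nrows).map (fun r =>
       PySem.Str.join "" ((List.range ncols).map (fun i =>
         padCellB (elems.getD (i * nrows + r) "") (colwidths.getD i 0))) ++ newline)) := by
  simp only [pad_eq, dataA_eq]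
  set pad := if PySem.Int.floordiv (width - llr + (ncols : Int)) (ncols : Int) < 1 then 1
    else PySem.Int.floordiv (width - llr + (ncols : Int)) (ncols : Int) with hpad
  -- column lengths
  have hlen : ∀ c ∈ (List.range ncols).map (fun i => (elems.drop (i * nrows)).take nrows),
      c.length = nrows := by
    intro c hc
    rw [List.mem_map] at hc
    obtain ⟨i, hi, rfl⟩ := hc
    rw [List.mem_range] at hi
    apply slice_str_length
    calc i * nrows + nrows = (i + 1) * nrows := by rw [Nat.add_mul]; omega
    _ ≤ ncols * nrows := Nat.mul_le_mul_right _ (by omega)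
    _ ≤ elems.length := h3
  -- the zip fuel is nrows
  have hfuel : (((List.range ncols).map (fun i => (elems.drop (i * nrows)).take nrows)).map
      List.length).foldl max 0 = nrows := by
    have : ((List.range ncols).map (fun i => (elems.drop (i * nrows)).take nrows)).map
        List.length = List.replicate ncols nrows := by
      apply List.eq_replicate_iff.mpr
      constructor
      · simp
      · intro b hb
        rw [List.mem_map] at hb
        obtain ⟨c, hc, rfl⟩ := hb
        exact hlen c hc
    rw [this]
    exact foldl_max_nat_replicate ncols nrows h1
  have hne : (List.range ncols).map (fun i => (elems.drop (i * nrows)).take nrows) ≠ [] := by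
    simp [List.map_eq_nil_iff]
    omega
  rw [hfuel, zipLongest_grid nrows _ hne hlen]
  -- colwidths agree
  have hcw0 : ((List.range ncols).map (fun i => (elems.drop (i * nrows)).take nrows)).map
      (fun d => pyMaxInt (d.map PySem.Str.len) + pad)
      = (List.range ncols).map (fun i =>
          ((List.range nrows).foldl (fun m r =>
            let w := PySem.Str.len (elems.getD (i * nrows + r) "")
            if m < w then w else m) 0) + pad) := by
    rw [List.map_map]
    apply List.map_congr_left
    intro i hi
    rw [List.mem_range] at hi
    simp only [Function.comp]
    congr 1
    apply maxlen_eq elems (i * nrows) nrows h2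
    calc i * nrows + nrows = (i + 1) * nrows := by rw [Nat.add_mul]; omega
    _ ≤ ncols * nrows := Nat.mul_le_mul_right _ (by omega)
    _ ≤ elems.length := h3
  rw [hcw0]
  -- last-element forms agree
  have hcw0ne : (List.range ncols).map (fun i =>
      ((List.range nrows).foldl (fun m r =>
        let w := PySem.Str.len (elems.getD (i * nrows + r) "")
        if m < w then w else m) 0) + pad) ≠ [] := by
    simp [List.map_eq_nil_iff]
    omega
  have hlast : PySem.List.pyGetD ((List.range ncols).map (fun i =>
      ((List.range nrows).foldl (fun m r =>
        let w := PySem.Str.len (elems.getD (i * nrows + r) "")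
        if m < w then w else m) 0) + pad)) (-1) 0
      = ((List.range ncols).map (fun i =>
      ((List.range nrows).foldl (fun m r =>
        let w := PySem.Str.len (elems.getD (i * nrows + r) "")
        if m < w then w else m) 0) + pad)).getLast?.getD 0 := by
    rw [PySem.List.pyGetD_neg_one _ _ hcw0ne, List.getLast?_eq_some_getLast (h := hcw0ne)]
    rfl
  rw [hlast]
  -- rows
  rw [List.map_map]
  apply List.map_congr_left
  intro r hr
  rw [List.mem_range] at hr
  simp only [Function.comp_apply]
  congr 1
  apply congrArg
  apply map_pyRange_zero
  intro i hi
  rw [padField_eq, PySem.List.pyGetD_natCast, PySem.List.pyGetD_natCast]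
  have hbound : i * nrows + nrows ≤ elems.length := by
    calc i * nrows + nrows = (i + 1) * nrows := by rw [Nat.add_mul]; omega
    _ ≤ ncols * nrows := Nat.mul_le_mul_right _ (by omega)
    _ ≤ elems.length := h3
  congr 1
  rw [List.map_map, getD_map_range _ _ _ _ hi]
  exact slice_str_getD elems (i * nrows) nrows r hbound hr

-- ===== MAIN PROOF =====


theorem columnize_pvWitness_ok :
    Dom_columnize pvWitness_columnize.1 pvWitness_columnize.2.1 pvWitness_columnize.2.2 ∧
    Pre_columnize pvWitness_columnize.1 pvWitness_columnize.2.1 pvWitness_columnize.2.2 := by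
  constructor <;> decide

-- ===== VERDICT (by name: the statement is the Claim_ definition above) =====
theorem columnize_spec : Claim_equal_columnize := by
  intro elems width newline _ hpre
  obtain ⟨hne, hor⟩ := hpre
  have hlen1 : 1 ≤ elems.length := List.length_pos_of_ne_nil hne
  unfold Spec_columnize columnize columnize_alt
  set S := List.map (fun e => PySem.Str.len e + 1) elems with hS
  have hSlen : S.length = elems.length := by rw [hS]; exact List.length_map ..
  by_cases hfit : S.sum - 1 ≤ width
  · simp only [if_pos hfit]
    rw [hSlen]
    have := tail_eq elems width newline elems.length 1 S.sum hlen1 (le_refl 1)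
      (by rw [Nat.mul_one])
    simp only [Nat.cast_one] at this
    exact this
  · have hall : ∀ e ∈ elems, PySem.Str.len e ≤ width := hor.resolve_left hfit
    have hn2 : 2 ≤ elems.length := by
      by_contra hcon
      have h1 : elems.length = 1 := by omega
      obtain ⟨e, he⟩ := List.length_eq_one_iff.mp h1
      have hx := hall e (by rw [he]; exact List.mem_cons_self)
      have hsum : S.sum = PySem.Str.len e + 1 := by rw [hS, he]; simp
      rw [hsum] at hfit
      omega
    have hSne : S ≠ [] := by
      intro hc
      rw [hc] at hSlen
      simp at hSlen
      omega
    have hmax : pyMaxInt S ≤ width + 1 := by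
      have hmem := pyMaxInt_mem S hSne
      obtain ⟨e, he, heq⟩ := List.mem_map.mp
        (show pyMaxInt S ∈ List.map (fun e => PySem.Str.len e + 1) elems by
          rw [← hS]; exact hmem)
      have := hall e he
      omega
    have ht : TblOk S (S :: buildLevelsB elems.length elems.length 1 S) := by
      have := table_ok S
      rw [hSlen] at this
      exact this
    set tbl := S :: buildLevelsB elems.length elems.length 1 S with htbl
    -- B's first search step
    have hcur : longestB tbl elems.length 1 = pyMaxInt S := by
      have h := longest_eq S tbl ht 1 (le_refl 1) (by omega)
      rw [hSlen] at h
      rw [← h]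
      have hc1 : ((1 : Nat) : Int) = (1 : Int) := Nat.cast_one
      rw [hc1]
      have := colsForA_one S
      rw [hSlen] at this
      rw [this]
      simp
    have hB1 : searchB tbl elems.length width (elems.length + 1) 1 0
        = searchB tbl elems.length width elems.length 2 (pyMaxInt S) := by
      rw [searchB]
      simp only [hcur]
      rw [if_neg (by omega)]
    -- A's first loop step
    have hA1 : columnizeLoopA S ((elems.length : Nat) : Int) width (elems.length + 1) 1 [S]
          (pyMaxInt S)
        = columnizeLoopA S ((elems.length : Nat) : Int) width elems.length 2
          (colsForA S ((elems.length : Nat) : Int) 2) (pyMaxInt S) := by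
      rw [columnizeLoopA]
      simp only [List.map_cons, List.map_nil, List.sum_cons, List.sum_nil, add_zero]
      rw [if_pos (by omega)]
      norm_num [colsForA]
    -- synchronise the two searches
    have hsync := loop_sync S width tbl ht hfit elems.length 2 (pyMaxInt S)
      (le_refl 2) (by omega) (by omega)
    rw [hSlen] at hsync
    simp only [Nat.cast_ofNat] at hsync
    set C := (searchB tbl elems.length width elems.length 2 (pyMaxInt S)).1 with hC
    set LLR := (searchB tbl elems.length width elems.length 2 (pyMaxInt S)).2 with hLLR
    obtain ⟨hsA, hC2, hCn⟩ := hsync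
    have hcastC : ((C : Int) - 1) = ((C - 1 : Nat) : Int) := by omega
    have hfd : PySem.Int.floordiv ((elems.length : Nat) : Int) ((C - 1 : Nat) : Int)
        = ((elems.length / (C - 1) : Nat) : Int) := PySem.Int.floordiv_natCast _ _
    rw [hcastC, hfd] at hsA
    -- finish
    simp only [if_neg hfit]
    rw [hA1, hsA, hB1]
    dsimp only
    have h1 : 1 ≤ C - 1 := by omega
    have h2 : 1 ≤ elems.length / (C - 1) := (Nat.one_le_div_iff (by omega)).mpr (by omega)
    have h3 : (C - 1) * (elems.length / (C - 1)) ≤ elems.length := by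
      rw [Nat.mul_comm]
      exact Nat.div_mul_le_self _ _
    exact tail_eq elems width newline (C - 1) (elems.length / (C - 1)) LLR h1 h2 h3
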